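-- pv_equiv track=rewrite | github.com/George-Ober/TP-ITC | TP9/piles-files.py | extraire_positif
-- ===== SOURCE A (Python) =====
-- def creer_pile_vide():
--     # Renvoie une pile vide
--     return []
--
-- def empiler(e, p):
--     p.append(e)
--
-- def depiler(p):
--     sommet = p.pop()
--     return sommet
--
-- def est_pile_vide(p):
--     return len(p) == 0
--
-- def extraire_positif(p):
--     a = creer_pile_vide()
--     b = creer_pile_vide()
--
--     while not est_pile_vide(p):
--         j = depiler(p)
--         if j > 0:
--             empiler(j, a)
--         empiler(j, b)
--
--     n = 0
--     while not est_pile_vide(a):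
--         empiler(depiler(a), p)
--         n += 1
--
--     while not est_pile_vide(p):
--         empiler(depiler(p), b)
--
--     k = 0
--     while k < n:
--         empiler(depiler(b), a)
--         k += 1
--
--     while not est_pile_vide(b):
--         empiler(depiler(b), p)
--
--     return a
-- ===== SOURCE B (Python) =====
-- def extraire_positif(p):
--     # One direct pass: collect the elements > 0 in order; p is not touched.
--     return [e for e in p if e > 0]
-- ===== Notes on version B (the rewrite author's own statement) =====
-- stated objective: simpler
-- what changed: Replaces A's five stack-transfer loops through two auxiliary stacks (which empty p and then fully restore it) with a single non-mutating filtering pass returning [e for e in p if e > 0].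
import Mathlib
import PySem

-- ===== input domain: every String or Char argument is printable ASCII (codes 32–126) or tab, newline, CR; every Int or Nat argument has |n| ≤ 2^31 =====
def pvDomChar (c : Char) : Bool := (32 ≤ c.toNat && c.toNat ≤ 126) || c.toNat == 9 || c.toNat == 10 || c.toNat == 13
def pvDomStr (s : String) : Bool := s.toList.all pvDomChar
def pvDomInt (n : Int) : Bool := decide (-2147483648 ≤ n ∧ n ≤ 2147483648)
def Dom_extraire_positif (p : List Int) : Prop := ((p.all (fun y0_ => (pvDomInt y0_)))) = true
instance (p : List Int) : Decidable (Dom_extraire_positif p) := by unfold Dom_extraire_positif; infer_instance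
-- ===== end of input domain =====

-- B replaces A's five stack-transfer loops (two auxiliary stacks, p emptied then fully
-- restored) with one non-mutating filtering pass; equivalence is about the RETURN value
-- (A mutates p during execution but restores it completely before returning).

-- ===== PORT A =====
-- Stacks are Python lists: empiler = append at the end, depiler = pop the last element.

-- while not est_pile_vide(p): j = depiler(p); if j > 0: empiler(j, a); empiler(j, b)
def epLoop1 (p a b : List Int) : List Int × List Int × List Int :=
  if p.isEmpty then ([], a, b)
  else
    let j := p.getLast!
    epLoop1 p.dropLast (if j > 0 then a ++ [j] else a) (b ++ [j])
termination_by p.length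
decreasing_by rename_i h; simp [List.isEmpty_iff] at h; simp [List.length_dropLast]
              exact List.length_pos_of_ne_nil h

-- n = 0; while not est_pile_vide(a): empiler(depiler(a), p); n += 1
def epLoop2 (a p : List Int) (n : Nat) : List Int × Nat :=
  if a.isEmpty then (p, n)
  else epLoop2 a.dropLast (p ++ [a.getLast!]) (n + 1)
termination_by a.length
decreasing_by rename_i h; simp [List.isEmpty_iff] at h; simp [List.length_dropLast]
              exact List.length_pos_of_ne_nil h

-- while not est_pile_vide(p): empiler(depiler(p), b)
def epLoop3 (p b : List Int) : List Int :=
  if p.isEmpty then b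
  else epLoop3 p.dropLast (b ++ [p.getLast!])
termination_by p.length
decreasing_by rename_i h; simp [List.isEmpty_iff] at h; simp [List.length_dropLast]
              exact List.length_pos_of_ne_nil h

-- k = 0; while k < n: empiler(depiler(b), a); k += 1
def epLoop4 (k n : Nat) (b a : List Int) : List Int × List Int :=
  if k < n then epLoop4 (k + 1) n b.dropLast (a ++ [b.getLast!]) else (b, a)
termination_by n - k

-- while not est_pile_vide(b): empiler(depiler(b), p)
def epLoop5 (b p : List Int) : List Int :=
  if b.isEmpty then p
  else epLoop5 b.dropLast (p ++ [b.getLast!])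
termination_by b.length
decreasing_by rename_i h; simp [List.isEmpty_iff] at h; simp [List.length_dropLast]
              exact List.length_pos_of_ne_nil h

def extraire_positif (p : List Int) : List Int :=
  let r1 := epLoop1 p [] []            -- (p, a, b) after the first loop
  let r2 := epLoop2 r1.2.1 r1.1 0      -- (p, n) after the second loop
  let b2 := epLoop3 r2.1 r1.2.2        -- b after the third loop
  let r4 := epLoop4 0 r2.2 b2 []       -- (b, a) after the fourth loop
  let _p3 := epLoop5 r4.1 []           -- restores p; p is not returned
  r4.2

-- ===== PORT B =====
def extraire_positif_alt (p : List Int) : List Int :=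
  p.filter (fun e => e > 0)

-- ===== PRECONDITION & SPEC =====
def Spec_extraire_positif (p : List Int) (out : List Int) : Prop := out = extraire_positif_alt p
instance (p : List Int) (out : List Int) : Decidable (Spec_extraire_positif p out) := by unfold Spec_extraire_positif; infer_instance

-- ===== CLAIM (what is proved, stated in full; the proofs are below) =====
def Claim_equal_extraire_positif : Prop := ∀ (p : List Int), Dom_extraire_positif p → Spec_extraire_positif p (extraire_positif p)

-- ===== LEMMAS AND PROOFS =====

theorem epLoop1_eq (p : List Int) : ∀ a b,
    epLoop1 p a b = ([], a ++ p.reverse.filter (fun e => decide (e > 0)), b ++ p.reverse) := by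
  induction p using List.reverseRecOn with
  | nil => intro a b; rw [epLoop1.eq_def]; simp
  | append_singleton xs x ih =>
    intro a b
    rw [epLoop1.eq_def]
    simp [ih, List.filter_cons]
    split_ifs <;> simp

theorem epLoop2_eq (a : List Int) : ∀ p n,
    epLoop2 a p n = (p ++ a.reverse, n + a.length) := by
  induction a using List.reverseRecOn with
  | nil => intro p n; rw [epLoop2.eq_def]; simp
  | append_singleton xs x ih =>
    intro p n
    rw [epLoop2.eq_def]
    simp [ih]
    omega

theorem epLoop3_eq (p : List Int) : ∀ b, epLoop3 p b = b ++ p.reverse := by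
  induction p using List.reverseRecOn with
  | nil => intro b; rw [epLoop3.eq_def]; simp
  | append_singleton xs x ih =>
    intro b
    rw [epLoop3.eq_def]
    simp [ih]

theorem epLoop4_eq (m : Nat) : ∀ k b a, m ≤ b.length →
    epLoop4 k (k + m) b a = (b.take (b.length - m), a ++ b.reverse.take m) := by
  induction m with
  | zero => intro k b a _; rw [epLoop4.eq_def]; simp
  | succ m ih =>
    intro k b a hm
    rcases List.eq_nil_or_concat b with rfl | ⟨ys, y, rfl⟩
    · simp at hm
    · simp only [List.concat_eq_append, List.length_append, List.length_cons,
        List.length_nil] at hm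
      rw [epLoop4.eq_def, if_pos (by omega)]
      have hk : k + (m + 1) = (k + 1) + m := by omega
      rw [hk, ih (k + 1) _ _ (by simp; omega)]
      simp [List.take_append_of_le_length (show ys.length - m ≤ ys.length by omega)]

theorem extraire_positif_eq_filter (p : List Int) :
    extraire_positif p = p.filter (fun e => decide (e > 0)) := by
  simp only [extraire_positif, epLoop1_eq, epLoop2_eq, epLoop3_eq]
  rw [epLoop4_eq _ 0 _ _ (by simp)]
  simp [List.filter_reverse]

-- ===== VERDICT (by name: the statement is the Claim_ definition above) =====
theorem extraire_positif_spec : Claim_equal_extraire_positif := by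
  intro p _
  unfold Spec_extraire_positif extraire_positif_alt
  exact extraire_positif_eq_filter p
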